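-- pv_equiv track=rewrite | github.com/yousif-toama/sig-light | src/sig_light/lyndon.py | standard_factorization
-- ===== SOURCE A (Python) =====
-- def standard_factorization(
--     word: tuple[int, ...],
-- ) -> tuple[tuple[int, ...], tuple[int, ...]]:
--     """Find the standard (CFL) factorization of a Lyndon word.
--
--     The standard factorization of a Lyndon word w is the unique
--     split w = uv where v is the longest proper Lyndon suffix of w.
--
--     Args:
--         word: A Lyndon word as a tuple of integers.
--
--     Returns:
--         Pair (u, v) where w = u + v, both u and v are Lyndon,
--         and u < v lexicographically.
--     """
--     n = len(word)
--     # Find longest proper Lyndon suffix by checking all suffixes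
--     for split in range(1, n):
--         suffix = word[split:]
--         if _is_lyndon(suffix):
--             return word[:split], suffix
--     msg = f"No standard factorization found for {word}"
--     raise ValueError(msg)
--
-- def _is_lyndon(word: tuple[int, ...]) -> bool:
--     """Check whether a word is a Lyndon word."""
--     n = len(word)
--     if n == 0:
--         return False
--     for i in range(1, n):
--         rotation = word[i:] + word[:i]
--         if rotation <= word:
--             return False
--     return True
-- ===== SOURCE B (Python) =====
-- def standard_factorization(
--     word: tuple[int, ...],
-- ) -> tuple[tuple[int, ...], tuple[int, ...]]:
--     """Standard factorization w = uv with v the lexicographically smallest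
--     proper suffix of w (equivalently, its longest proper Lyndon suffix)."""
--     split = min(range(1, len(word)), key=lambda i: word[i:])
--     return word[:split], word[split:]
-- ===== Notes on version B (the rewrite author's own statement) =====
-- stated objective: faster
-- what changed: Instead of scanning splits and testing each suffix for Lyndon-ness by comparing it with all of its rotations, B returns the split at the lexicographically smallest proper suffix (min over range(1,n) keyed by word[i:]), which provably equals the longest proper Lyndon suffix.
-- outside the precondition, e.g. on standard_factorization(()): A raises ValueError, B raises ValueError; on standard_factorization((5,)): A raises ValueError, B raises ValueError
import Mathlib
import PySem

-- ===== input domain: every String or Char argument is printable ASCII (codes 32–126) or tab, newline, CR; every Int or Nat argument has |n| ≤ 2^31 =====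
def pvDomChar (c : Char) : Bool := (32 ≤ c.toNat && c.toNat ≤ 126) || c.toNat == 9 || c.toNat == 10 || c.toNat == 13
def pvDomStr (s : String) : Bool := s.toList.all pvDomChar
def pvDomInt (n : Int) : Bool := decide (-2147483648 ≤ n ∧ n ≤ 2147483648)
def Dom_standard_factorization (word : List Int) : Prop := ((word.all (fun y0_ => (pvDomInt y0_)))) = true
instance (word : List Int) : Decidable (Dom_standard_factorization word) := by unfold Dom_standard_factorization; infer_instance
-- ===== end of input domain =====

-- B replaces A's scan-for-a-Lyndon-suffix (with an all-rotations Lyndon test inside)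
-- by directly taking the lexicographically smallest proper suffix; return values only
-- are compared, no argument is mutated.

-- ===== PORT A =====
-- Python `rotation <= word` on int tuples is `≤` on List Int (lexicographic, shorter prefix smaller)
def _is_lyndon (w : List Int) : Bool :=
  let n := w.length
  if n = 0 then false
  else (List.range' 1 (n - 1)).all (fun i => !decide (w.drop i ++ w.take i ≤ w))

def standard_factorization (word : List Int) : List Int × List Int :=
  -- n = len(word); range(1, n) is List.range' 1 (word.length - 1)
  match (List.range' 1 (word.length - 1)).find? (fun split => _is_lyndon (word.drop split)) with
  | some split => (word.take split, word.drop split)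
  | none => ([], [])   -- Python: raise ValueError; excluded by Pre_

-- ===== PORT B =====
def standard_factorization_alt (word : List Int) : List Int × List Int :=
  match PySem.List.min? (List.range' 1 (word.length - 1)) (fun i => word.drop i) with
  | some split => (word.take split, word.drop split)
  | none => ([], [])   -- Python: min() of an empty range raises ValueError; excluded by Pre_

-- ===== PRECONDITION & SPEC =====
-- Pre_ excludes words of length < 2, on which Python A raises ValueError (and B's min() raises too).
def Pre_standard_factorization (word : List Int) : Prop := 2 ≤ word.length
instance (word : List Int) : Decidable (Pre_standard_factorization word) := by unfold Pre_standard_factorization; infer_instance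
def pvWitness_standard_factorization : List Int := [0, 1]

def Spec_standard_factorization (word : List Int) (out : List Int × List Int) : Prop := out = standard_factorization_alt word
instance (word : List Int) (out : List Int × List Int) : Decidable (Spec_standard_factorization word out) := by unfold Spec_standard_factorization; infer_instance

-- ===== CLAIM (what is proved, stated in full; the proofs are below) =====
def Claim_equal_standard_factorization : Prop := ∀ (word : List Int), Dom_standard_factorization word → Pre_standard_factorization word → Spec_standard_factorization word (standard_factorization word)

-- ===== LEMMAS AND PROOFS =====

-- lexicographic `<` cancels a common prefix
theorem pv_append_left_lt_iff (t u v : List Int) : t ++ u < t ++ v ↔ u < v := by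
  induction t with
  | nil => simp
  | cons a t ih => simpa [List.cons_lt_cons_iff] using ih

-- w < t with t at most as long as w: the comparison is decided by a mismatch,
-- so appending anything to t keeps w smaller
theorem pv_lt_append_of_lt (w t z : List Int) (h : w < t) (hlen : t.length ≤ w.length) :
    w < t ++ z := by
  induction w generalizing t z with
  | nil =>
    have ht : t = [] := List.eq_nil_of_length_eq_zero (by simpa using hlen)
    subst ht
    exact absurd h (lt_irrefl [])
  | cons a as ih =>
    match t with
    | [] => exact absurd h (List.not_lt_nil _)
    | b :: bs =>
      rcases List.cons_lt_cons_iff.mp h with h1 | ⟨rfl, h2⟩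
      · exact List.cons_lt_cons_iff.mpr (Or.inl h1)
      · exact List.cons_lt_cons_iff.mpr (Or.inr ⟨rfl, ih bs z h2 (by simpa using hlen)⟩)

-- t < w not via the prefix rule: appending anything to t keeps it smaller than w
theorem pv_append_lt_of_lt (t w z : List Int) (h : t < w) (hp : ¬ t <+: w) :
    t ++ z < w := by
  induction t generalizing w z with
  | nil => exact absurd (List.nil_prefix) hp
  | cons a as ih =>
    match w with
    | [] => exact absurd h (List.not_lt_nil _)
    | b :: bs =>
      rcases List.cons_lt_cons_iff.mp h with h1 | ⟨rfl, h2⟩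
      · exact List.cons_lt_cons_iff.mpr (Or.inl h1)
      · refine List.cons_lt_cons_iff.mpr (Or.inr ⟨rfl, ih bs z h2 ?_⟩)
        intro hpre
        exact hp (List.cons_prefix_cons.mpr ⟨rfl, hpre⟩)

-- equal-length strict comparison survives arbitrary appends on both sides
theorem pv_append_lt_append (v u x y : List Int) (h : v < u) (hlen : v.length = u.length) :
    v ++ x < u ++ y := by
  induction v generalizing u x y with
  | nil =>
    match u with
    | [] => exact absurd h (lt_irrefl [])
  | cons a as ih =>
    match u with
    | b :: bs =>
      rcases List.cons_lt_cons_iff.mp h with h1 | ⟨rfl, h2⟩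
      · exact List.cons_lt_cons_iff.mpr (Or.inl h1)
      · exact List.cons_lt_cons_iff.mpr (Or.inr ⟨rfl, ih bs x y h2 (by simpa using hlen)⟩)

-- find? on a strictly increasing list returns the stated first hit
theorem pv_find?_eq_some_of_first (p : Nat → Bool) (l : List Nat) (m : Nat)
    (hs : l.Pairwise (· < ·)) (hm : m ∈ l) (hpm : p m = true)
    (hbefore : ∀ j ∈ l, j < m → p j = false) : l.find? p = some m := by
  induction l with
  | nil => cases hm
  | cons a t ih =>
    rcases List.mem_cons.mp hm with rfl | hmt
    · simp [List.find?, hpm]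
    · have ha : a < m := (List.pairwise_cons.mp hs).1 m hmt
      have hpa : p a = false := hbefore a List.mem_cons_self ha
      simp only [List.find?, hpa]
      exact ih (List.pairwise_cons.mp hs).2 hmt
        (fun j hj hjm => hbefore j (List.mem_cons_of_mem a hj) hjm)

-- the strictly smallest proper suffix is Lyndon in A's (all-rotations) sense
theorem pv_isLyndon_of_min (word : List Int) (m : Nat) (hm1 : 1 ≤ m) (hmn : m < word.length)
    (hlt : ∀ i, 1 ≤ i → i < word.length → i ≠ m → word.drop m < word.drop i) :
    _is_lyndon (word.drop m) = true := by
  have hwlen : (word.drop m).length = word.length - m := List.length_drop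
  have hne : (word.drop m).length ≠ 0 := by omega
  unfold _is_lyndon
  rw [if_neg hne, List.all_eq_true]
  intro i hi
  rw [List.mem_range'_1] at hi
  have hk : word.drop m < (word.drop m).drop i := by
    rw [List.drop_drop]
    exact hlt (m + i) (by omega) (by omega) (by omega)
  have h2 : word.drop m < (word.drop m).drop i ++ (word.drop m).take i :=
    pv_lt_append_of_lt _ _ _ hk (by simp; omega)
  have h3 := not_le.mpr h2
  simp only [List.drop_drop] at h3
  simp [h3]

-- a word with a strictly smaller proper suffix has a rotation ≤ itself
theorem pv_not_isLyndon_of_smaller_suffix (w : List Int) (i : Nat) (h1 : 1 ≤ i)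
    (hi : i < w.length) (hlt : w.drop i < w) : _is_lyndon w = false := by
  have hne : w.length ≠ 0 := by omega
  set t := w.drop i with ht
  have htlen : t.length = w.length - i := List.length_drop
  -- the rotation index that works, and the fact that its rotation is ≤ w
  have main : ∃ j, 1 ≤ j ∧ j < w.length ∧ w.drop j ++ w.take j ≤ w := by
    by_cases hp : t <+: w
    · -- border case: w = t ++ v = u ++ t with u = take i w, v = drop (len−i) w
      set b := w.length - i with hb
      have htake : w.take b = t := by
        have h0 := List.prefix_iff_eq_take.mp hp
        rw [← htlen]
        exact h0.symm
      by_cases huv : w.drop b < w.take i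
      · -- rotate by b: drop b w ++ t  <  take i w ++ t = w
        refine ⟨b, by omega, by omega, le_of_lt ?_⟩
        rw [htake, ht]
        calc w.drop b ++ w.drop i < w.take i ++ w.drop i := by
              refine pv_append_lt_append _ _ _ _ huv ?_
              simp; omega
          _ = w := List.take_append_drop i w
      · -- rotate by i: t ++ take i w ≤ t ++ drop b w = w
        refine ⟨i, h1, hi, ?_⟩
        rw [← ht]
        have : t ++ w.take i ≤ t ++ w.drop b := by
          have := not_lt.mp huv
          rcases lt_or_eq_of_le this with hlt' | heq
          · exact le_of_lt ((pv_append_left_lt_iff t _ _).mpr hlt')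
          · rw [heq]
        calc t ++ w.take i ≤ t ++ w.drop b := this
          _ = w.take b ++ w.drop b := by rw [htake]
          _ = w := List.take_append_drop b w
    · -- mismatch case: rotate by i, t ++ take i w < w
      exact ⟨i, h1, hi, le_of_lt (pv_append_lt_of_lt t w (w.take i) hlt hp)⟩
  obtain ⟨j, hj1, hjn, hle⟩ := main
  unfold _is_lyndon
  simp only [if_neg hne]
  refine List.all_eq_false.mpr ⟨j, ?_, by simp [hle]⟩
  rw [List.mem_range'_1]; omega

-- ===== VERDICT (by name: the statement is the Claim_ definition above) =====
theorem standard_factorization_spec : Claim_equal_standard_factorization := by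
  intro word _hdom hpre
  unfold Pre_standard_factorization at hpre
  unfold Spec_standard_factorization
  have hn : 2 ≤ word.length := hpre
  -- B's min() returns some index m
  have hRne : List.range' 1 (word.length - 1) ≠ [] := by
    simp only [ne_eq, List.range'_eq_nil_iff]; omega
  obtain ⟨m, hmin⟩ : ∃ m, PySem.List.min? (List.range' 1 (word.length - 1)) (fun i => word.drop i) = some m := by
    cases h : PySem.List.min? (List.range' 1 (word.length - 1)) (fun i => word.drop i) with
    | none => exact absurd ((PySem.List.min?_eq_none_iff _ _).mp h) hRne
    | some m => exact ⟨m, rfl⟩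
  have hmR : m ∈ List.range' 1 (word.length - 1) := PySem.List.min?_mem hmin
  -- bridge the two (propositionally equal) DecidableLT instances on List ℤ
  have hmin' : @PySem.List.min? ℕ (List ℤ) List.instLinearOrder.toLT LinearOrder.toDecidableLT
      (List.range' 1 (word.length - 1)) (fun i => word.drop i) = some m := by
    have e : (fun (a b : List Int) => a.decidableLT b) = @LinearOrder.toDecidableLT (List Int) _ := by
      funext a b; exact Subsingleton.elim _ _
    rw [← e]; exact hmin
  rw [List.mem_range'_1] at hmR
  have hmn : m < word.length := by omega
  -- strict minimality of the suffix at m (suffixes at distinct indices have distinct lengths)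
  have hstrict : ∀ i, 1 ≤ i → i < word.length → i ≠ m → word.drop m < word.drop i := by
    intro i h1 hin hne
    have hiR : i ∈ List.range' 1 (word.length - 1) := by rw [List.mem_range'_1]; omega
    have hle : word.drop m ≤ word.drop i := by
      simpa using PySem.List.min?_isMin hmin' i hiR
    have hne' : word.drop m ≠ word.drop i := by
      intro heq
      have := congrArg List.length heq
      simp only [List.length_drop] at this
      omega
    exact lt_of_le_of_ne hle hne'
  -- A's scan stops exactly at m
  have hfind : (List.range' 1 (word.length - 1)).find? (fun split => _is_lyndon (word.drop split)) = some m := by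
    refine pv_find?_eq_some_of_first _ _ m (List.pairwise_lt_range' ..) ?_ ?_ ?_
    · rw [List.mem_range'_1]; omega
    · exact pv_isLyndon_of_min word m hmR.1 hmn hstrict
    · intro j hj hjm
      rw [List.mem_range'_1] at hj
      refine pv_not_isLyndon_of_smaller_suffix (word.drop j) (m - j) (by omega)
        (by simp only [List.length_drop]; omega) ?_
      rw [List.drop_drop]
      have : j + (m - j) = m := by omega
      rw [this]
      exact hstrict j hj.1 (by omega) (by omega)
  unfold standard_factorization standard_factorization_alt
  rw [hfind, hmin]
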